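-- pv_equiv track=rewrite | github.com/timHan1968/President-Says | ngrams.py | addMacro
-- ===== SOURCE A (Python) =====
-- BEGINNING_OF_SENTENCE = "<s>"
--
-- END_OF_SENTENCE = "</s>"
--
-- STOPPERS = ['.', '?', '!']
--
-- def addMacro(words, addBegin):
-- 	"""
-- 	Take in a list of words then preprocss it by adding proper macroes
-- 	like BEGINNING_OF_SENTENCE and END_OF_SENTENCEself.
--
-- 	Input
-- 	-------
-- 	- words: A list of strings that contain all tokens of a line in txt
-- 	- addBegin: A boolean value indicating whether the sentence starter
-- 	should be inserted at beginning of the given line.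
--
-- 	Output
-- 	--------
-- 	- words: The original [words] but with proper macros inserted
-- 	- addBegin: Whether the next line begins as a new sentence.
-- 	"""
-- 	if addBegin:
-- 		words.insert(0, BEGINNING_OF_SENTENCE)
-- 		addBegin = False
--
-- 	r = len(words)
--
-- 	for i in range(r):
-- 		if words[i] in STOPPERS:
-- 			words.insert(i+1, END_OF_SENTENCE)
-- 			if (i+2) == len(words):
-- 				#Already at end of line
-- 				addBegin = True
-- 			elif words[i+2] != '”':
-- 				words.insert(i+2, BEGINNING_OF_SENTENCE)
--
-- 	#Continue to work if [line] has multiple sentences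
-- 	while(r != len(words)):
-- 		new_r = len(words)
-- 		for i in range(r, new_r):
-- 			if words[i] in STOPPERS:
-- 				words.insert(i+1, END_OF_SENTENCE)
-- 				if (i+2) == len(words):
-- 					#Already at end of line
-- 					addBegin = True
-- 				elif words[i+2] != '”':
-- 					words.insert(i+2, BEGINNING_OF_SENTENCE)
-- 		r = new_r
--
-- 	return words, addBegin
-- ===== SOURCE B (Python) =====
-- BEGINNING_OF_SENTENCE = "<s>"
--
-- END_OF_SENTENCE = "</s>"
--
-- STOPPERS = ['.', '?', '!']
--
-- def addMacro(words, addBegin):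
--     # Two-phase rewrite: split into sentence segments, then assemble with macros.
--     # Mutates `words` in place (words[:] = out), like the original.
--     segs = []
--     cur = []
--     for w in words:
--         cur.append(w)
--         if w in STOPPERS:
--             segs.append(cur)
--             cur = []
--     pieces = segs + ([cur] if cur else [])
--     out = [BEGINNING_OF_SENTENCE] if addBegin else []
--     for k, p in enumerate(pieces):
--         if k > 0 and p[0] != '”':
--             out.append(BEGINNING_OF_SENTENCE)
--         out.extend(p)
--         if p[-1] in STOPPERS:
--             out.append(END_OF_SENTENCE)
--     newBegin = bool(words) and words[-1] in STOPPERS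
--     words[:] = out
--     return words, newBegin
-- ===== Notes on version B (the rewrite author's own statement) =====
-- stated objective: simpler
-- what changed: A inserts macros into the list while iterating it by index and then repeatedly rescans the newly appended region with a while-loop of range passes; B makes one pass splitting the words into sentence segments and a second pass assembling a fresh output list from whole segments, computing the returned addBegin flag in closed form from the last word.
import Mathlib
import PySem

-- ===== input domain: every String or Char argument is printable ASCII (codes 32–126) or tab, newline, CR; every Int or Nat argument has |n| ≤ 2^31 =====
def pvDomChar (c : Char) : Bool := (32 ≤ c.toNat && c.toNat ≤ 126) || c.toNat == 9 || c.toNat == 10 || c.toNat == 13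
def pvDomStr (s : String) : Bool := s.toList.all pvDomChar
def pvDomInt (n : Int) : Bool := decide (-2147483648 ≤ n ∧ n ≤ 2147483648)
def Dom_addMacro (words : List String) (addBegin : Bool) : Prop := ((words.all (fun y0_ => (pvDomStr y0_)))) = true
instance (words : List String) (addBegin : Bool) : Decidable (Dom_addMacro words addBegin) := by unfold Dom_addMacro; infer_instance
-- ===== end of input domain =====

-- B replaces A's in-place insertions with rescanning passes by a two-phase split-into-sentence-segments
-- then assemble rewrite (objective: simpler); both mutate the caller's list to the same final contents,
-- the equivalence proved here is about the returned value.

-- ===== PORT A =====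
def pvStoppers : List String := [".", "?", "!"]

-- one iteration of A's loop body at index i (indices A visits are always in range, so pyGetD is exact there)
def pvStepA (st : List String × Bool) (i : Int) : List String × Bool :=
  if PySem.List.pyGetD st.1 i "" ∈ pvStoppers then
    let ws1 := PySem.List.insert st.1 (i+1) "</s>"
    if i + 2 = (ws1.length : Int) then (ws1, true)
    else if PySem.List.pyGetD ws1 (i+2) "" ≠ "”" then (PySem.List.insert ws1 (i+2) "<s>", st.2)
    else (ws1, st.2)
  else st

-- 'for i in range(a, b): …'
def pvForPass (ws : List String) (ab : Bool) (a b : Int) : List String × Bool :=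
  (PySem.List.pyRange a b 1).foldl pvStepA (ws, ab)

-- 'while r != len(words): …'; the fuel only makes the recursion total: each pass strictly increases r
-- towards len(words) ≤ 3·(initial length), so 2·len+2 passes always suffice (proved in the lemmas below)
def pvWhile (ws : List String) (ab : Bool) (r : Int) : Nat → List String × Bool
  | 0 => (ws, ab)
  | fuel+1 =>
    if r = (ws.length : Int) then (ws, ab)
    else
      pvWhile (pvForPass ws ab r (ws.length : Int)).1 (pvForPass ws ab r (ws.length : Int)).2
        ((ws.length : Int)) fuel

def addMacro (words : List String) (addBegin : Bool) : List String × Bool :=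
  let st0 := if addBegin then (PySem.List.insert words 0 "<s>", false) else (words, addBegin)
  let r : Int := (st0.1.length : Int)
  let st1 := pvForPass st0.1 st0.2 0 r
  pvWhile st1.1 st1.2 r (2 * st0.1.length + 2)

-- ===== PORT B =====
def pvStopB (w : String) : Bool := w == "." || w == "?" || w == "!"

-- phase 1 (one step): close the current segment at a stopper
def pvSplitStep (st : List (List String) × List String) (w : String) : List (List String) × List String :=
  if pvStopB w then (st.1 ++ [st.2 ++ [w]], []) else (st.1, st.2 ++ [w])

-- phase 2 (one step): emit one piece with its macros (pieces are nonempty, so headD/getLastD = p[0]/p[-1])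
def pvAsmStep (out : List String) (kp : Int × List String) : List String :=
  let o1 := if 0 < kp.1 ∧ kp.2.headD "" ≠ "”" then out ++ ["<s>"] else out
  let o2 := o1 ++ kp.2
  if pvStopB (kp.2.getLastD "") then o2 ++ ["</s>"] else o2

def addMacro_alt (words : List String) (addBegin : Bool) : List String × Bool :=
  let sp := words.foldl pvSplitStep ([], [])
  let pieces := sp.1 ++ (if sp.2.isEmpty then [] else [sp.2])
  let out0 := if addBegin then ["<s>"] else []
  let out := (PySem.List.enumerate pieces 0).foldl pvAsmStep out0
  (out, !words.isEmpty && pvStopB (words.getLastD ""))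

-- ===== PRECONDITION & SPEC =====
def Spec_addMacro (words : List String) (addBegin : Bool) (out : List String × Bool) : Prop := out = addMacro_alt words addBegin
instance (words : List String) (addBegin : Bool) (out : List String × Bool) : Decidable (Spec_addMacro words addBegin out) := by unfold Spec_addMacro; infer_instance

-- ===== CLAIM (what is proved, stated in full; the proofs are below) =====
def Claim_equal_addMacro : Prop := ∀ (words : List String) (addBegin : Bool), Dom_addMacro words addBegin → Spec_addMacro words addBegin (addMacro words addBegin)

-- ===== LEMMAS AND PROOFS =====

-- the single-index step of A, seen on the split state (done = already scanned, rest = from the index on)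
def pvStep : List String × List String × Bool → List String × List String × Bool
  | (done, [], ab) => (done, [], ab)
  | (done, w :: rest, ab) =>
    if pvStopB w then
      if rest = [] then (done ++ [w], ["</s>"], true)
      else if rest.headD "" ≠ "”" then (done ++ [w], "</s>" :: "<s>" :: rest, ab)
      else (done ++ [w], "</s>" :: rest, ab)
    else (done ++ [w], rest, ab)

def pvIter : Nat → (List String × List String × Bool) → (List String × List String × Bool)
  | 0, s => s
  | n+1, s => pvIter n (pvStep s)

-- number of indices A scans until the unscanned suffix is exhausted
def pvCost : List String → Nat
  | [] => 0
  | w :: rest =>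
    if pvStopB w then
      if rest = [] then 2
      else if rest.headD "" ≠ "”" then 3 + pvCost rest
      else 2 + pvCost rest
    else 1 + pvCost rest

-- the whole scan, done at once
def pvProc : List String → List String → Bool → List String × Bool
  | done, [], ab => (done, ab)
  | done, w :: rest, ab =>
    if pvStopB w then
      if rest = [] then (done ++ [w, "</s>"], true)
      else if rest.headD "" ≠ "”" then pvProc (done ++ [w, "</s>", "<s>"]) rest ab
      else pvProc (done ++ [w, "</s>"]) rest ab
    else pvProc (done ++ [w]) rest ab
theorem mem_stoppers (w : String) : (w ∈ pvStoppers) ↔ pvStopB w = true := by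
  simp [pvStoppers, pvStopB]; tauto

theorem stepA_eq (done rest : List String) (ab : Bool) :
    pvStepA (done ++ rest, ab) (done.length : Int) =
      ((pvStep (done, rest, ab)).1 ++ (pvStep (done, rest, ab)).2.1, (pvStep (done, rest, ab)).2.2) := by
  cases rest with
  | nil =>
    have hget : PySem.List.pyGetD (done ++ ([] : List String)) (done.length : Int) "" = "" := by
      simp
    simp only [pvStepA, pvStep]
    rw [if_neg (by rw [hget]; simp [pvStoppers])]
  | cons w rest' =>
    have hget : PySem.List.pyGetD (done ++ w :: rest') (done.length : Int) "" = w := by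
      simp [List.getD]
    by_cases hs : pvStopB w = true
    · have hmem : w ∈ pvStoppers := (mem_stoppers w).2 hs
      have hins1 : PySem.List.insert (done ++ w :: rest') ((done.length : Int) + 1) "</s>"
          = done ++ w :: "</s>" :: rest' := by
        have h := PySem.List.insert_natCast (done ++ w :: rest') (done.length + 1) "</s>" (by simp)
        push_cast at h
        rw [h]
        simp [List.take_append]
      cases rest' with
      | nil =>
        have hc : (done.length : Int) + 2 = ((done ++ w :: "</s>" :: []).length : Int) := by
          simp only [List.length_append, List.length_cons, List.length_nil]
          push_cast
          try ring
        simp only [pvStepA]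
        rw [if_pos (by rw [hget]; exact hmem)]
        simp only [hins1]
        rw [if_pos hc]
        simp [pvStep, hs]
      | cons h2 t2 =>
        have hc : ¬ ((done.length : Int) + 2 = ((done ++ w :: "</s>" :: h2 :: t2).length : Int)) := by
          simp only [List.length_append, List.length_cons]
          push_cast
          omega
        have hget2 : PySem.List.pyGetD (done ++ w :: "</s>" :: h2 :: t2) ((done.length : Int) + 2) "" = h2 := by
          have he : ((done.length : Int) + 2) = (((done.length + 2 : Nat)) : Int) := by push_cast; ring
          have he2 : done ++ w :: "</s>" :: h2 :: t2 = (done ++ [w, "</s>"]) ++ h2 :: t2 := by simp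
          have hl : done.length + 2 = (done ++ [w, "</s>"]).length := by simp
          rw [he, PySem.List.pyGetD_natCast, he2, hl]
          simp [List.getD]
        by_cases hq : h2 ≠ "”"
        · have hins2 : PySem.List.insert (done ++ w :: "</s>" :: h2 :: t2) ((done.length : Int) + 2) "<s>"
              = done ++ w :: "</s>" :: "<s>" :: h2 :: t2 := by
            have h := PySem.List.insert_natCast (done ++ w :: "</s>" :: h2 :: t2) (done.length + 2) "<s>"
              (by simp only [List.length_append, List.length_cons]; omega)
            push_cast at h
            rw [h]
            simp [List.take_append, List.take_succ_cons]
          simp only [pvStepA]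
          rw [if_pos (by rw [hget]; exact hmem)]
          simp only [hins1]
          rw [if_neg hc, if_pos (by rw [hget2]; exact hq)]
          simp [pvStep, hs, hins2, hq]
        · have hq2 : h2 = "”" := not_not.mp hq
          simp only [pvStepA]
          rw [if_pos (by rw [hget]; exact hmem)]
          simp only [hins1]
          rw [if_neg hc, if_neg (by rw [hget2]; exact hq)]
          simp [pvStep, hs, hq2]
    · have hmem : ¬ (w ∈ pvStoppers) := fun h => hs ((mem_stoppers w).1 h)
      simp only [pvStepA, pvStep]
      rw [if_neg (by rw [hget]; exact hmem), if_neg (by simp [hs])]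
      simp
theorem stepA_id (done : List String) (ab : Bool) (i : Int) (h : (done.length : Int) ≤ i) :
    pvStepA (done, ab) i = (done, ab) := by
  have hn : PySem.List.pyGet? done i = none := by
    rw [PySem.List.pyGet?_eq_none_iff]
    simp [PySem.Raise.InRange]
    omega
  have hg : PySem.List.pyGetD done i "" = "" := by
    simp [PySem.List.pyGetD_of_none _ _ _ hn]
  simp only [pvStepA]
  rw [if_neg (by rw [hg]; simp [pvStoppers])]

theorem foldl_stepA_id (rng : List Int) (done : List String) (ab : Bool)
    (h : ∀ i ∈ rng, (done.length : Int) ≤ i) :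
    rng.foldl pvStepA (done, ab) = (done, ab) := by
  induction rng with
  | nil => rfl
  | cons i r ih =>
    rw [List.foldl_cons, stepA_id done ab i (h i (by simp))]
    exact ih fun j hj => h j (by simp [hj])

theorem iter_nil (n : Nat) (done : List String) (ab : Bool) :
    pvIter n (done, [], ab) = (done, [], ab) := by
  induction n with
  | zero => rfl
  | succ m ih => rw [pvIter, pvStep, ih]

theorem step_fst (done : List String) (w : String) (rest' : List String) (ab : Bool) :
    (pvStep (done, w :: rest', ab)).1 = done ++ [w] := by
  simp only [pvStep]
  split_ifs <;> rfl

theorem forPass_eq (n : Nat) (done rest : List String) (ab : Bool) :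
    pvForPass (done ++ rest) ab (done.length : Int) ((done.length : Int) + n) =
      ((pvIter n (done, rest, ab)).1 ++ (pvIter n (done, rest, ab)).2.1,
       (pvIter n (done, rest, ab)).2.2) := by
  induction n generalizing done rest ab with
  | zero =>
    simp [pvForPass, PySem.List.pyRange_one_eq_nil, pvIter]
  | succ m ih =>
    have hlt : (done.length : Int) < (done.length : Int) + (m + 1 : Nat) := by push_cast; omega
    rw [pvForPass, PySem.List.pyRange_one_cons hlt, List.foldl_cons, stepA_eq]
    cases rest with
    | nil =>
      rw [iter_nil]
      simp only [pvStep, List.append_nil]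
      rw [foldl_stepA_id _ done ab (by intro i hi; rw [PySem.List.mem_pyRange_one] at hi; omega)]
    | cons w r' =>
      have hfst : (pvStep (done, w :: r', ab)).1 = done ++ [w] := step_fst done w r' ab
      have hiter : pvIter (m + 1) (done, w :: r', ab) = pvIter m (pvStep (done, w :: r', ab)) := rfl
      have heta : pvStep (done, w :: r', ab)
          = ((pvStep (done, w :: r', ab)).1, (pvStep (done, w :: r', ab)).2.1, (pvStep (done, w :: r', ab)).2.2) := rfl
      have h1 : (done.length : Int) + 1 = (((done ++ [w]).length : Nat) : Int) := by simp
      have h2 : (done.length : Int) + (m + 1 : Nat) = (((done ++ [w]).length : Nat) : Int) + m := by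
        simp
        omega
      rw [hiter, heta, hfst, h1, h2]
      exact ih (done ++ [w]) _ _
theorem cost_ge (rest : List String) : rest.length ≤ pvCost rest := by
  induction rest with
  | nil => simp [pvCost]
  | cons w r ih =>
    simp only [pvCost, List.length_cons]
    split_ifs with h1 h2 <;> first | (subst h2; simp) | omega

theorem cost_le (rest : List String) : pvCost rest ≤ 3 * rest.length := by
  induction rest with
  | nil => simp [pvCost]
  | cons w r ih => simp only [pvCost, List.length_cons]; split_ifs <;> omega

theorem cost_eq_zero {rest : List String} (h : pvCost rest = 0) : rest = [] := by
  cases rest with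
  | nil => rfl
  | cons w r =>
    have := cost_ge (w :: r)
    simp at this
    omega

theorem step_shape (done : List String) (w : String) (rest : List String) (ab : Bool) :
    (pvStep (done, w :: rest, ab)).1.length = done.length + 1
      ∧ pvCost (pvStep (done, w :: rest, ab)).2.1 = pvCost (w :: rest) - 1 := by
  simp only [pvStep, pvCost]
  split_ifs with h1 h2 h3 <;> simp [pvCost, pvStopB] <;> try omega

theorem iter_decomp (n : Nat) (done rest : List String) (ab : Bool) (h : n ≤ pvCost rest) :
    (pvIter n (done, rest, ab)).1.length = done.length + n
      ∧ pvCost (pvIter n (done, rest, ab)).2.1 = pvCost rest - n := by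
  induction n generalizing done rest ab with
  | zero => simp [pvIter]
  | succ m ih =>
    cases rest with
    | nil => simp [pvCost] at h
    | cons w r' =>
      have hs := step_shape done w r' ab
      have hc1 : 1 ≤ pvCost (w :: r') := by have := cost_ge (w :: r'); simp at this; omega
      have hiter : pvIter (m + 1) (done, w :: r', ab) = pvIter m (pvStep (done, w :: r', ab)) := rfl
      have heta : pvStep (done, w :: r', ab)
          = ((pvStep (done, w :: r', ab)).1, (pvStep (done, w :: r', ab)).2.1, (pvStep (done, w :: r', ab)).2.2) := rfl
      rw [hiter, heta]
      have := ih (pvStep (done, w :: r', ab)).1 (pvStep (done, w :: r', ab)).2.1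
        (pvStep (done, w :: r', ab)).2.2 (by omega)
      omega

theorem stopB_end : pvStopB "</s>" = false := by decide
theorem stopB_beg : pvStopB "<s>" = false := by decide

theorem proc_cons_nonstop (d : List String) (w : String) (rest : List String) (ab : Bool)
    (h : pvStopB w = false) : pvProc d (w :: rest) ab = pvProc (d ++ [w]) rest ab := by
  cases rest <;> simp [pvProc, h]

theorem proc_cons_stop (d : List String) (w : String) (rest : List String) (ab : Bool)
    (h : pvStopB w = true) :
    pvProc d (w :: rest) ab =
      if rest = [] then (d ++ [w, "</s>"], true)
      else if rest.headD "" ≠ "”" then pvProc (d ++ [w, "</s>", "<s>"]) rest ab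
      else pvProc (d ++ [w, "</s>"]) rest ab := by
  cases rest <;> simp [pvProc, h]

theorem proc_step (done rest : List String) (ab : Bool) :
    pvProc (pvStep (done, rest, ab)).1 (pvStep (done, rest, ab)).2.1 (pvStep (done, rest, ab)).2.2
      = pvProc done rest ab := by
  cases rest with
  | nil => rfl
  | cons w r' =>
    simp only [pvStep]
    split_ifs with h1 h2 h3
    · subst h2
      rw [proc_cons_nonstop _ _ _ _ stopB_end, proc_cons_stop _ _ _ _ h1]
      simp [pvProc]
    · rw [proc_cons_nonstop _ _ _ _ stopB_end, proc_cons_nonstop _ _ _ _ stopB_beg,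
        proc_cons_stop _ _ _ _ h1, if_neg h2, if_pos h3]
      simp
    · rw [proc_cons_nonstop _ _ _ _ stopB_end,
        proc_cons_stop _ _ _ _ h1, if_neg h2, if_neg h3]
      simp
    · rw [proc_cons_nonstop _ _ _ _ (by simpa using h1)]
theorem proc_iter (n : Nat) (s : List String × List String × Bool) :
    pvProc (pvIter n s).1 (pvIter n s).2.1 (pvIter n s).2.2 = pvProc s.1 s.2.1 s.2.2 := by
  induction n generalizing s with
  | zero => rfl
  | succ m ih =>
    obtain ⟨d, r, a⟩ := s
    rw [pvIter, ih (pvStep (d, r, a)), proc_step]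

theorem while_eq (fuel : Nat) (done rest : List String) (ab : Bool) (h : pvCost rest ≤ fuel) :
    pvWhile (done ++ rest) ab (done.length : Int) fuel = pvProc done rest ab := by
  induction fuel generalizing done rest ab with
  | zero =>
    have : rest = [] := cost_eq_zero (by omega)
    subst this
    simp [pvWhile, pvProc]
  | succ f ih =>
    by_cases hr : rest = []
    · subst hr
      simp [pvWhile, pvProc]
    · have hlen : 1 ≤ rest.length := by
        cases rest with | nil => exact absurd rfl hr | cons a b => simp
      rw [pvWhile]
      rw [if_neg (by simp; omega)]
      have hnr : ((done ++ rest).length : Int) = (done.length : Int) + (rest.length : Nat) := by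
        simp
      rw [hnr, forPass_eq rest.length done rest ab]
      have hd := iter_decomp rest.length done rest ab (cost_ge rest)
      have hcost2 : pvCost (pvIter rest.length (done, rest, ab)).2.1 ≤ f := by omega
      have hlen2 : ((done.length : Int) + (rest.length : Nat))
          = (((pvIter rest.length (done, rest, ab)).1.length : Nat) : Int) := by
        rw [hd.1]; push_cast
        try ring
      rw [hlen2, ih _ _ _ hcost2]
      have := proc_iter rest.length (done, rest, ab)
      simpa using this

theorem A_eq_proc (words : List String) (addBegin : Bool) :
    addMacro words addBegin
      = pvProc [] (if addBegin then "<s>" :: words else words) false := by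
  have main : ∀ ws : List String, pvWhile
      ((pvIter ws.length (([] : List String), ws, false)).1 ++ (pvIter ws.length (([] : List String), ws, false)).2.1)
      (pvIter ws.length (([] : List String), ws, false)).2.2
      (ws.length : Int) (2 * ws.length + 2) = pvProc [] ws false := by
    intro ws
    have hd := iter_decomp ws.length [] ws false (cost_ge ws)
    have hl : (ws.length : Int) = (((pvIter ws.length (([] : List String), ws, false)).1.length : Nat) : Int) := by
      rw [hd.1]; simp
    rw [hl, while_eq (2 * ws.length + 2) _ _ _ (by have := cost_le ws; omega)]
    have := proc_iter ws.length (([] : List String), ws, false)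
    simpa using this
  have hfp : ∀ ws : List String, pvForPass ws false 0 (ws.length : Int)
      = ((pvIter ws.length (([] : List String), ws, false)).1 ++ (pvIter ws.length (([] : List String), ws, false)).2.1,
         (pvIter ws.length (([] : List String), ws, false)).2.2) := by
    intro ws
    have := forPass_eq ws.length [] ws false
    simpa using this
  cases addBegin with
  | false =>
    simp only [addMacro, if_false, Bool.false_eq_true]
    rw [hfp words]
    exact main words
  | true =>
    simp only [addMacro, if_true, PySem.List.insert_zero]
    rw [hfp ("<s>" :: words)]
    exact main ("<s>" :: words)

theorem proc_prefix (rest d1 d2 : List String) (ab : Bool) :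
    pvProc (d1 ++ d2) rest ab = (d1 ++ (pvProc d2 rest ab).1, (pvProc d2 rest ab).2) := by
  induction rest generalizing d2 ab with
  | nil => simp [pvProc]
  | cons w r ih =>
    by_cases h1 : pvStopB w = true
    · rw [proc_cons_stop _ _ _ _ h1, proc_cons_stop _ _ _ _ h1]
      split_ifs with h2 h3
      · simp
      · rw [List.append_assoc, ih]
      · rw [List.append_assoc, ih]
    · rw [proc_cons_nonstop _ _ _ _ (by simpa using h1), proc_cons_nonstop _ _ _ _ (by simpa using h1),
        List.append_assoc, ih]

theorem proc_snd (rest : List String) : ∀ (done : List String) (ab : Bool),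
    (pvProc done rest ab).2 = (if pvStopB (rest.getLastD "") then true else ab) := by
  induction rest with
  | nil => intro done ab; simp [pvProc, pvStopB]
  | cons w r ih =>
    intro done ab
    cases r with
    | nil =>
      by_cases h1 : pvStopB w = true
      · rw [proc_cons_stop _ _ _ _ h1]
        simp [List.getLastD, h1]
      · rw [proc_cons_nonstop _ _ _ _ (by simpa using h1)]
        simp [pvProc, List.getLastD, h1]
    | cons a b =>
      have hlast : (w :: a :: b).getLastD "" = (a :: b).getLastD "" := by
        simp
      rw [hlast]
      by_cases h1 : pvStopB w = true
      · rw [proc_cons_stop _ _ _ _ h1, if_neg (by simp : ¬(a :: b) = [])]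
        by_cases hq : (a :: b).headD "" ≠ "”"
        · rw [if_pos hq, ih]
        · rw [if_neg hq, ih]
      · rw [proc_cons_nonstop _ _ _ _ (by simpa using h1), ih]
def pvSplit : List String → List String → List (List String) × List String
  | cur, [] => ([], cur)
  | cur, w :: ws =>
    if pvStopB w then
      ((cur ++ [w]) :: (pvSplit [] ws).1, (pvSplit [] ws).2)
    else pvSplit (cur ++ [w]) ws

def pvAsm : Bool → List String → List (List String) → List String
  | _, out, [] => out
  | first, out, p :: ps =>
    pvAsm false
      (if pvStopB (p.getLastD "") then
        ((if first = false ∧ p.headD "" ≠ "”" then out ++ ["<s>"] else out) ++ p) ++ ["</s>"]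
       else (if first = false ∧ p.headD "" ≠ "”" then out ++ ["<s>"] else out) ++ p) ps

def pvPieces (sp : List (List String) × List String) : List (List String) :=
  sp.1 ++ (if sp.2.isEmpty then [] else [sp.2])

theorem split_foldl (ws : List String) : ∀ (segs : List (List String)) (cur : List String),
    ws.foldl pvSplitStep (segs, cur) = (segs ++ (pvSplit cur ws).1, (pvSplit cur ws).2) := by
  induction ws with
  | nil => intro segs cur; simp [pvSplit]
  | cons w r ih =>
    intro segs cur
    by_cases h : pvStopB w = true
    · simp only [List.foldl_cons, pvSplitStep, pvSplit, h, if_true]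
      rw [ih]
      simp
    · simp only [List.foldl_cons, pvSplitStep, pvSplit, h]
      rw [ih]
      simp

theorem asm_foldl (ps : List (List String)) : ∀ (out : List String) (s : Int), 1 ≤ s →
    (PySem.List.enumerate ps s).foldl pvAsmStep out = pvAsm false out ps := by
  induction ps with
  | nil => intro out s hs; simp [PySem.List.enumerate_nil, pvAsm]
  | cons p pr ih =>
    intro out s hs
    rw [PySem.List.enumerate_cons, List.foldl_cons, pvAsm]
    have h0 : (0 : Int) < s := by omega
    simp only [pvAsmStep, h0, true_and]
    exact ih _ _ (by omega)

theorem asm_foldl0 (ps : List (List String)) (out : List String) :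
    (PySem.List.enumerate ps 0).foldl pvAsmStep out = pvAsm true out ps := by
  cases ps with
  | nil => simp [PySem.List.enumerate_nil, pvAsm]
  | cons p pr =>
    rw [PySem.List.enumerate_cons, List.foldl_cons, pvAsm]
    have hnot : ¬ ((0 : Int) < 0 ∧ p.headD "" ≠ "”") := by simp
    have hnot2 : ¬ ((true = false) ∧ p.headD "" ≠ "”") := by simp
    simp only [pvAsmStep, hnot, if_false, hnot2]
    exact asm_foldl pr _ 1 le_rfl

theorem headD_stable (cur : List String) (w : String) (ws : List String) :
    (cur ++ [w]).headD "" = (cur ++ w :: ws).headD "" := by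
  cases cur <;> simp

theorem getLastD_concat (cur : List String) (w : String) :
    (cur ++ [w]).getLastD "" = w := by
  simp [List.getLastD_eq_getLast?]

theorem nonstop_getLastD' (l : List String) : ∀ (dflt : String), pvStopB dflt = false →
    (∀ t ∈ l, pvStopB t = false) → pvStopB (l.getLastD dflt) = false := by
  induction l with
  | nil => intro dflt hd _; simpa [List.getLastD]
  | cons c cs ih =>
    intro dflt _ h
    rw [List.getLastD_cons]
    exact ih c (h c (by simp)) (fun t ht => h t (by simp [ht]))

theorem nonstop_getLastD (l : List String) (h : ∀ t ∈ l, pvStopB t = false) :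
    pvStopB (l.getLastD "") = false :=
  nonstop_getLastD' l "" (by decide) h

theorem proc_core (d rest : List String) :
    (pvProc d rest false).1 = d ++ (pvProc [] rest false).1 := by
  have h := proc_prefix rest d [] false
  simp only [List.append_nil] at h
  rw [h]

theorem asm_split (ws : List String) : ∀ (cur out : List String) (first : Bool),
    (∀ t ∈ cur, pvStopB t = false) →
    pvAsm first out (pvPieces (pvSplit cur ws)) =
      if (cur ++ ws) = [] then out
      else (if first = false ∧ (cur ++ ws).headD "" ≠ "”" then out ++ ["<s>"] else out)
             ++ cur ++ (pvProc [] ws false).1 := by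
  induction ws with
  | nil =>
    intro cur out first hcur
    cases cur with
    | nil => simp [pvSplit, pvPieces, pvAsm]
    | cons c cs =>
      have hl : pvStopB ((c :: cs).getLastD "") = false := nonstop_getLastD _ hcur
      have hl2 : pvStopB ((c :: cs).getLast?.getD "") = false := by
        simpa [List.getLastD_eq_getLast?] using hl
      simp [pvSplit, pvPieces, pvAsm, hl2, pvProc]
  | cons w ws2 ih =>
    intro cur out first hcur
    by_cases hw : pvStopB w = true
    · simp only [pvSplit, hw, if_true]
      have hpieces : pvPieces ((cur ++ [w]) :: (pvSplit [] ws2).1, (pvSplit [] ws2).2)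
          = (cur ++ [w]) :: pvPieces (pvSplit [] ws2) := by
        simp [pvPieces]
      rw [hpieces]
      simp only [pvAsm, getLastD_concat, hw, if_true]
      rw [ih [] _ false (by intro t ht; simp at ht)]
      simp only [List.nil_append, List.append_nil]
      cases ws2 with
      | nil =>
        rw [if_pos rfl, if_neg (show ¬(cur ++ w :: ([] : List String) = []) by simp)]
        rw [proc_cons_stop _ _ _ _ hw, if_pos rfl]
        rw [headD_stable cur w []]
        simp
      | cons v vs =>
        rw [if_neg (show ¬((v :: vs : List String) = []) by simp),
            if_neg (show ¬(cur ++ w :: v :: vs = []) by simp)]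
        rw [proc_cons_stop _ _ _ _ hw, if_neg (show ¬((v :: vs : List String) = []) by simp)]
        rw [headD_stable cur w (v :: vs)]
        by_cases hq : (v :: vs : List String).headD "" ≠ "”"
        · rw [if_pos (⟨trivial, hq⟩ : True ∧ (v :: vs : List String).headD "" ≠ "”"),
              if_pos hq, List.nil_append, proc_core [w, "</s>", "<s>"] (v :: vs)]
          simp
        · rw [if_neg (show ¬(True ∧ (v :: vs : List String).headD "" ≠ "”") from
                fun hc => hq hc.2),
              if_neg hq, List.nil_append]
          rw [proc_core [w, "</s>"] (v :: vs)]
          simp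
    · have hw' : pvStopB w = false := by simpa using hw
      simp only [pvSplit, hw', Bool.false_eq_true, if_false]
      rw [ih (cur ++ [w]) out first (by
        intro t ht
        rcases List.mem_append.1 ht with h | h
        · exact hcur t h
        · simp at h; subst h; exact hw')]
      rw [if_neg (show ¬(cur ++ [w] ++ ws2 = []) by simp)]
      rw [show (cur ++ [w] ++ ws2).headD "" = (cur ++ w :: ws2).headD "" from by cases cur <;> simp]
      rw [if_neg (show ¬(cur ++ w :: ws2 = []) by simp)]
      rw [show pvProc ([] : List String) (w :: ws2) false = pvProc [w] ws2 false from
        proc_cons_nonstop _ _ _ _ hw', proc_core [w] ws2]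
      simp
theorem glD (cs : List String) : ∀ (c d : String), (c :: cs).getLast?.getD d = cs.getLast?.getD c := by
  induction cs with
  | nil => intro c d; simp
  | cons a b ih => intro c d; rw [List.getLast?_cons_cons, ih a d, ih a c]

theorem B_eq_proc (words : List String) (addBegin : Bool) :
    addMacro_alt words addBegin = pvProc [] (if addBegin then "<s>" :: words else words) false := by
  have hsp : words.foldl pvSplitStep ([], []) = pvSplit [] words := by
    have h := split_foldl words [] []
    simpa using h
  have hpieces : ∀ sp : List (List String) × List String,
      sp.1 ++ (if sp.2.isEmpty then [] else [sp.2]) = pvPieces sp := fun _ => rfl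
  have hout : (PySem.List.enumerate (pvPieces (pvSplit [] words)) 0).foldl pvAsmStep
      (if addBegin then ["<s>"] else [])
      = (if addBegin then ["<s>"] else []) ++ (pvProc [] words false).1 := by
    rw [asm_foldl0, asm_split words [] _ true (by intro t ht; simp at ht)]
    cases words with
    | nil => simp [pvProc]
    | cons c cs => simp
  simp only [addMacro_alt, hsp, hpieces, hout]
  have hfst : (if addBegin then ["<s>"] else []) ++ (pvProc [] words false).1
      = (pvProc [] (if addBegin then "<s>" :: words else words) false).1 := by
    cases addBegin with
    | false => simp
    | true =>
      simp only [if_true]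
      rw [proc_cons_nonstop _ _ _ _ stopB_beg]
      simp only [List.nil_append]
      rw [proc_core ["<s>"] words]
  have hsnd : (!words.isEmpty && pvStopB (words.getLastD ""))
      = (pvProc [] (if addBegin then "<s>" :: words else words) false).2 := by
    rw [proc_snd]
    cases words with
    | nil =>
      cases addBegin <;> simp [List.getLastD, pvStopB]
    | cons c cs =>
      cases addBegin with
      | false => simp
      | true =>
        simp only [if_true, List.isEmpty_cons, Bool.not_false, Bool.true_and,
          List.getLastD_eq_getLast?]
        rw [glD (c :: cs) "<s>" "", glD cs c "<s>", glD cs c ""]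
        simp
  rw [hfst, hsnd]

-- ===== VERDICT (by name: the statement is the Claim_ definition above) =====
theorem addMacro_spec : Claim_equal_addMacro := by
  intro words addBegin _
  unfold Spec_addMacro
  rw [A_eq_proc, B_eq_proc]
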